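-- pv_equiv track=rewrite | github.com/ZeleOeO/XPlane-AI-ATC | src/ai_atc/atc/readback.py | _parse_compound_number
-- ===== SOURCE A (Python) =====
-- COMPOUND_NUMBERS: dict[str, int] = {
--     "ten": 10, "eleven": 11, "twelve": 12, "thirteen": 13,
--     "fourteen": 14, "fifteen": 15, "sixteen": 16, "seventeen": 17,
--     "eighteen": 18, "nineteen": 19, "twenty": 20, "thirty": 30,
--     "forty": 40, "fifty": 50, "sixty": 60, "seventy": 70,
--     "eighty": 80, "ninety": 90, "hundred": 100, "thousand": 1000,
-- }
--
-- def _parse_compound_number(words: list[str]) -> list[int]: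
--     """Parse compound spoken numbers like 'thirty five thousand' → [35000]."""
--     results: list[int] = []
--     current = 0
--     in_number = False
--
--     single_map = {
--         "zero": 0, "one": 1, "two": 2, "three": 3, "four": 4,
--         "five": 5, "six": 6, "seven": 7, "eight": 8, "nine": 9,
--     }
--
--     for w in words:
--         low = w.lower().strip(".,;:!?")
--
--         if low in single_map:
--             current += single_map[low]
--             in_number = True
--         elif low in COMPOUND_NUMBERS:
--             val = COMPOUND_NUMBERS[low]
--             if val >= 100:
--                 current = max(current, 1) * val
--             else:
--                 current += val
--             in_number = True
--         elif in_number: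
--             if current > 0:
--                 results.append(current)
--             current = 0
--             in_number = False
--
--     if in_number and current > 0:
--         results.append(current)
--
--     return results
-- ===== SOURCE B (Python) =====
-- COMPOUND_NUMBERS: dict[str, int] = {
--     "ten": 10, "eleven": 11, "twelve": 12, "thirteen": 13,
--     "fourteen": 14, "fifteen": 15, "sixteen": 16, "seventeen": 17,
--     "eighteen": 18, "nineteen": 19, "twenty": 20, "thirty": 30,
--     "forty": 40, "fifty": 50, "sixty": 60, "seventy": 70,
--     "eighty": 80, "ninety": 90, "hundred": 100, "thousand": 1000,
-- }
--
-- _SINGLE = {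
--     "zero": 0, "one": 1, "two": 2, "three": 3, "four": 4,
--     "five": 5, "six": 6, "seven": 7, "eight": 8, "nine": 9,
-- }
--
--
-- def _parse_compound_number(words: list[str]) -> list[int]:
--     """Parse compound spoken numbers like 'thirty five thousand' -> [35000]."""
--     # Pass 1: split words into contiguous groups of recognized number values.
--     groups: list[list[int]] = []
--     cur: list[int] = []
--     for w in words:
--         low = w.lower().strip(".,;:!?")
--         if low in _SINGLE:
--             cur.append(_SINGLE[low])
--         elif low in COMPOUND_NUMBERS:
--             cur.append(COMPOUND_NUMBERS[low])
--         elif cur: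
--             groups.append(cur)
--             cur = []
--     if cur:
--         groups.append(cur)
--
--     # Pass 2: reduce each group left-to-right; keep only positive totals.
--     out: list[int] = []
--     for g in groups:
--         total = 0
--         for v in g:
--             total = max(total, 1) * v if v >= 100 else total + v
--         if total > 0:
--             out.append(total)
--     return out
-- ===== Notes on version B (the rewrite author's own statement) =====
-- stated objective: simpler
-- what changed: Replaced A's single-pass in_number/current state machine with a two-pass segment-then-reduce decomposition: pass 1 splits the words into contiguous groups of recognized number values, pass 2 folds each group left-to-right and keeps positive totals.
import Mathlib
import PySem

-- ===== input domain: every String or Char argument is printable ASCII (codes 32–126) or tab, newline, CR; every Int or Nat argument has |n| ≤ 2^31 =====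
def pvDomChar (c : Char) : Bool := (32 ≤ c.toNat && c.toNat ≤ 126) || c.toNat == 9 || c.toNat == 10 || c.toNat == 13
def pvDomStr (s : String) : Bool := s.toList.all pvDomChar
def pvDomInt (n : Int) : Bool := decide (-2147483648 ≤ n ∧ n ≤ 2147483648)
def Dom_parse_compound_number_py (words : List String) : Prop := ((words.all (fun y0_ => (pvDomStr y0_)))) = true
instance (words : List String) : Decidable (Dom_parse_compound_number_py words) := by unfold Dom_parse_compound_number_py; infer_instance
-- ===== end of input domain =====

-- B replaces A's in_number/current state machine by an explicit two-pass
-- segment-then-reduce decomposition (objective: simpler structure, same cost).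

-- shared module constants (the Python dicts) and the word normalization
def pvCompound : PySem.Dict String Int := PySem.Dict.ofList
  [("ten", 10), ("eleven", 11), ("twelve", 12), ("thirteen", 13),
   ("fourteen", 14), ("fifteen", 15), ("sixteen", 16), ("seventeen", 17),
   ("eighteen", 18), ("nineteen", 19), ("twenty", 20), ("thirty", 30),
   ("forty", 40), ("fifty", 50), ("sixty", 60), ("seventy", 70),
   ("eighty", 80), ("ninety", 90), ("hundred", 100), ("thousand", 1000)]

def pvSingle : PySem.Dict String Int := PySem.Dict.ofList
  [("zero", 0), ("one", 1), ("two", 2), ("three", 3), ("four", 4),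
   ("five", 5), ("six", 6), ("seven", 7), ("eight", 8), ("nine", 9)]

-- w.lower().strip(".,;:!?")
def pvNorm (w : String) : String := PySem.Str.stripChars (PySem.Str.lower w) ".,;:!?"

-- ===== PORT A =====
-- state (results, current, in_number); one step of A's for-loop
def pvStepA (st : List Int × Int × Bool) (w : String) : List Int × Int × Bool :=
  let (results, current, in_number) := st
  let low := pvNorm w
  match pvSingle.get? low with
  | some v => (results, current + v, true)
  | none =>
    match pvCompound.get? low with
    | some val =>
        if val ≥ 100 then (results, max current 1 * val, true)
        else (results, current + val, true)
    | none =>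
        if in_number then
          ((if current > 0 then results ++ [current] else results), 0, false)
        else (results, current, in_number)

def pvFinishA (st : List Int × Int × Bool) : List Int :=
  if st.2.2 ∧ st.2.1 > 0 then st.1 ++ [st.2.1] else st.1

def parse_compound_number_py (words : List String) : List Int :=
  pvFinishA (words.foldl pvStepA ([], 0, false))

-- ===== PORT B =====
-- pass 1: state (groups, cur); a recognized word extends cur, anything else closes it
def pvStepB (st : List (List Int) × List Int) (w : String) : List (List Int) × List Int :=
  let (groups, cur) := st
  let low := pvNorm w
  match pvSingle.get? low with
  | some v => (groups, cur ++ [v])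
  | none =>
    match pvCompound.get? low with
    | some v => (groups, cur ++ [v])
    | none => if cur ≠ [] then (groups ++ [cur], []) else (groups, cur)

-- pass 2 inner loop: reduce one group left-to-right
def pvReduce (g : List Int) : Int :=
  g.foldl (fun total v => if v ≥ 100 then max total 1 * v else total + v) 0

-- pass 2 outer loop step: keep only positive totals
def pvEmit (out : List Int) (g : List Int) : List Int :=
  let total := pvReduce g
  if total > 0 then out ++ [total] else out

def pvCloseB (st : List (List Int) × List Int) : List (List Int) :=
  if st.2 ≠ [] then st.1 ++ [st.2] else st.1

def parse_compound_number_py_alt (words : List String) : List Int :=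
  (pvCloseB (words.foldl pvStepB ([], []))).foldl pvEmit []

-- ===== PRECONDITION & SPEC =====
def Spec_parse_compound_number_py (words : List String) (out : List Int) : Prop := out = parse_compound_number_py_alt words
instance (words : List String) (out : List Int) : Decidable (Spec_parse_compound_number_py words out) := by unfold Spec_parse_compound_number_py; infer_instance

-- ===== CLAIM (what is proved, stated in full; the proofs are below) =====
def Claim_equal_parse_compound_number_py : Prop := ∀ (words : List String), Dom_parse_compound_number_py words → Spec_parse_compound_number_py words (parse_compound_number_py words)

-- ===== LEMMAS AND PROOFS =====

-- the suffix of results that A's loop (plus its final flush) produces from state (current, in_number)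
def pvALoop (ws : List String) (current : Int) (in_number : Bool) : List Int :=
  match ws with
  | [] => if in_number ∧ current > 0 then [current] else []
  | w :: ws =>
    match pvSingle.get? (pvNorm w) with
    | some v => pvALoop ws (current + v) true
    | none =>
      match pvCompound.get? (pvNorm w) with
      | some val =>
          if val ≥ 100 then pvALoop ws (max current 1 * val) true
          else pvALoop ws (current + val) true
      | none =>
          if in_number then
            (if current > 0 then [current] else []) ++ pvALoop ws 0 false
          else pvALoop ws current in_number

-- the suffix of groups B's pass 1 (plus its final closure) produces from open group cur
def pvBGroups (ws : List String) (cur : List Int) : List (List Int) :=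
  match ws with
  | [] => if cur ≠ [] then [cur] else []
  | w :: ws =>
    match pvSingle.get? (pvNorm w) with
    | some v => pvBGroups ws (cur ++ [v])
    | none =>
      match pvCompound.get? (pvNorm w) with
      | some v => pvBGroups ws (cur ++ [v])
      | none => if cur ≠ [] then cur :: pvBGroups ws [] else pvBGroups ws cur

theorem pvSingle_lt_100 (s : String) (v : Int) (h : pvSingle.get? s = some v) : v < 100 := by
  have hm := PySem.Dict.mem_items_of_get?_eq_some pvSingle h
  rw [show pvSingle.items =
      [("zero", 0), ("one", 1), ("two", 2), ("three", 3), ("four", 4),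
       ("five", 5), ("six", 6), ("seven", 7), ("eight", 8), ("nine", 9)] from rfl] at hm
  simp only [List.mem_cons, List.not_mem_nil, or_false] at hm
  rcases hm with h' | h' | h' | h' | h' | h' | h' | h' | h' | h' <;>
    (injection h' with h1 h2; omega)

theorem pvReduce_append (g : List Int) (v : Int) :
    pvReduce (g ++ [v]) = if v ≥ 100 then max (pvReduce g) 1 * v else pvReduce g + v := by
  simp [pvReduce, List.foldl_append]

theorem pvAfold_eq (ws : List String) (r : List Int) (c : Int) (i : Bool) :
    pvFinishA (ws.foldl pvStepA (r, c, i)) = r ++ pvALoop ws c i := by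
  induction ws generalizing r c i with
  | nil =>
    simp only [List.foldl_nil, pvFinishA, pvALoop]
    split <;> simp
  | cons w ws ih =>
    rw [List.foldl_cons]
    simp only [pvALoop]
    rcases h1 : pvSingle.get? (pvNorm w) with _ | v
    · rcases h2 : pvCompound.get? (pvNorm w) with _ | val
      · simp only [pvStepA, h1, h2]
        cases i with
        | false => exact ih r c false
        | true =>
          by_cases hc : c > 0
          · rw [if_pos hc, if_pos hc, ih]
            simp
          · rw [if_neg hc, if_neg hc, ih]
            simp
      · simp only [pvStepA, h1, h2]
        by_cases hv : val ≥ 100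
        · rw [if_pos hv, if_pos hv, ih]
        · rw [if_neg hv, if_neg hv, ih]
    · simp only [pvStepA, h1]
      exact ih r (c + v) true

theorem pvBfold_eq (ws : List String) (gs : List (List Int)) (cur : List Int) :
    pvCloseB (ws.foldl pvStepB (gs, cur)) = gs ++ pvBGroups ws cur := by
  induction ws generalizing gs cur with
  | nil =>
    simp only [List.foldl_nil, pvCloseB, pvBGroups]
    split <;> simp
  | cons w ws ih =>
    rw [List.foldl_cons]
    simp only [pvBGroups]
    rcases h1 : pvSingle.get? (pvNorm w) with _ | v
    · rcases h2 : pvCompound.get? (pvNorm w) with _ | v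
      · simp only [pvStepB, h1, h2]
        by_cases hcur : cur = []
        · rw [if_neg (by simp [hcur]), if_neg (by simp [hcur])]
          exact ih gs cur
        · rw [if_pos (by simp [hcur]), if_pos (by simp [hcur]), ih]
          simp
      · simp only [pvStepB, h1, h2]
        exact ih gs (cur ++ [v])
    · simp only [pvStepB, h1]
      exact ih gs (cur ++ [v])

theorem pvEmit_out (gs : List (List Int)) (out : List Int) :
    gs.foldl pvEmit out = out ++ gs.foldl pvEmit [] := by
  induction gs generalizing out with
  | nil => simp
  | cons g gs ih =>
    rw [List.foldl_cons, List.foldl_cons, ih, ih (pvEmit [] g)]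
    simp only [pvEmit]
    split <;> simp

theorem pvMain (ws : List String) (cur : List Int) :
    pvALoop ws (pvReduce cur) (decide (cur ≠ [])) = (pvBGroups ws cur).foldl pvEmit [] := by
  induction ws generalizing cur with
  | nil =>
    by_cases hcur : cur = []
    · subst hcur
      simp [pvALoop, pvBGroups, pvReduce]
    · have hd : (decide (cur ≠ [])) = true := by simp [hcur]
      simp only [pvALoop, pvBGroups, hd, if_pos hcur, List.foldl_cons, List.foldl_nil,
        pvEmit, List.nil_append]
      by_cases hr : pvReduce cur > 0 <;> simp [hr]
  | cons w ws ih =>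
    rcases h1 : pvSingle.get? (pvNorm w) with _ | v
    · rcases h2 : pvCompound.get? (pvNorm w) with _ | val
      · by_cases hcur : cur = []
        · subst hcur
          simp only [pvALoop, pvBGroups, h1, h2]
          simpa [pvReduce] using ih []
        · have hd : (decide (cur ≠ [])) = true := by simp [hcur]
          simp only [pvALoop, pvBGroups, h1, h2, hd, if_pos hcur, if_true, List.foldl_cons]
          rw [pvEmit_out (pvBGroups ws []) (pvEmit [] cur)]
          have hI : pvALoop ws 0 false = (pvBGroups ws []).foldl pvEmit [] := by
            simpa [pvReduce] using ih []
          rw [hI]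
          simp [pvEmit]
      · simp only [pvALoop, pvBGroups, h1, h2]
        have := ih (cur ++ [val])
        rw [pvReduce_append, show decide ((cur ++ [val]) ≠ []) = true by simp] at this
        by_cases hv : val ≥ 100
        · rw [if_pos hv] at this
          rw [if_pos hv]
          exact this
        · rw [if_neg hv] at this
          rw [if_neg hv]
          exact this
    · simp only [pvALoop, pvBGroups, h1]
      have := ih (cur ++ [v])
      rw [pvReduce_append, if_neg (by have := pvSingle_lt_100 _ v h1; omega),
          show decide ((cur ++ [v]) ≠ []) = true by simp] at this
      exact this

-- ===== VERDICT (by name: the statement is the Claim_ definition above) =====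
theorem parse_compound_number_py_spec : Claim_equal_parse_compound_number_py := by
  intro words _
  unfold Spec_parse_compound_number_py parse_compound_number_py parse_compound_number_py_alt
  rw [pvAfold_eq words [] 0 false, pvBfold_eq words [] []]
  simpa using pvMain words []
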